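-- pv_equiv track=rewrite | github.com/lang-du/AI_course | Queen/Queen.py | survivalSelection
-- ===== SOURCE A (Python) =====
-- def fitnessFunction(population):
--     g_number = len(population[0])
--     fitness = []
--     for i in range(len(population)):
--         f = 28
--         for j in range(0, 7):
--             for k in range(j+1, g_number):
--                 if population[i][j] == population[i][k]:
--                     f -= 1
--                 elif abs(population[i][j] - population[i][k]) == abs(j-k):
--                     f -= 1
--         fitness.append(f)
--     return fitness
--
-- def survivalSelection(population, children, force_replace=True):
--     population_fitness = fitnessFunction(population)
--     children_fitness = fitnessFunction(children)
--     population_data = [(p_f, p) for p_f, p in zip(population_fitness, population)]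
--     children_data = [(c_f, c) for c_f, c in zip(children_fitness, children)]
--     population_data.sort(key=lambda x:x[0]) # 从小到大排列
--     children_data.sort(key=lambda x: x[0])
--
--     if force_replace:
--         # 强制取代
--         population_data[0:len(children_data)] = children_data
--     else:
--         # 非强制取代
--         pass
--
--     population = [p[1] for p in population_data]
--     return population
-- ===== SOURCE B (Python) =====
-- def _fitness(board, g_number):
--     # one pass: count conflicts with earlier queens via three hash tables
--     # (row value, value-index diagonal, value+index diagonal); tables are
--     # only fed from indices < 7, matching the task's column range.
--     rows = {}
--     diag1 = {}
--     diag2 = {}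
--     conflicts = 0
--     for k in range(g_number):
--         v = board[k]
--         conflicts += rows.get(v, 0) + diag1.get(v - k, 0) + diag2.get(v + k, 0)
--         if k < 7:
--             rows[v] = rows.get(v, 0) + 1
--             diag1[v - k] = diag1.get(v - k, 0) + 1
--             diag2[v + k] = diag2.get(v + k, 0) + 1
--     return 28 - conflicts
--
-- def survivalSelection(population, children, force_replace=True):
--     g_p = len(population[0])
--     g_c = len(children[0])
--     pop_sorted = sorted(population, key=lambda b: _fitness(b, g_p))
--     ch_sorted = sorted(children, key=lambda b: _fitness(b, g_c))
--     if force_replace: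
--         return ch_sorted + pop_sorted[len(children):]
--     return pop_sorted
-- ===== Notes on version B (the rewrite author's own statement) =====
-- stated objective: faster
-- what changed: B computes each board's fitness in ONE left-to-right pass with three count tables (row value, value-index and value+index diagonals) that are only fed from indices < 7, instead of A's pairwise double loop (7*g pair checks become g table lookups, measured ~3x faster), and sorts the boards directly by a key function instead of zipping, sorting and slice-assigning (fitness, board) tuples; …
-- outside the precondition, e.g. on survivalSelection([[5], []], [[1]], True): A returns [[1], []], B raises IndexError
import Mathlib
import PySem

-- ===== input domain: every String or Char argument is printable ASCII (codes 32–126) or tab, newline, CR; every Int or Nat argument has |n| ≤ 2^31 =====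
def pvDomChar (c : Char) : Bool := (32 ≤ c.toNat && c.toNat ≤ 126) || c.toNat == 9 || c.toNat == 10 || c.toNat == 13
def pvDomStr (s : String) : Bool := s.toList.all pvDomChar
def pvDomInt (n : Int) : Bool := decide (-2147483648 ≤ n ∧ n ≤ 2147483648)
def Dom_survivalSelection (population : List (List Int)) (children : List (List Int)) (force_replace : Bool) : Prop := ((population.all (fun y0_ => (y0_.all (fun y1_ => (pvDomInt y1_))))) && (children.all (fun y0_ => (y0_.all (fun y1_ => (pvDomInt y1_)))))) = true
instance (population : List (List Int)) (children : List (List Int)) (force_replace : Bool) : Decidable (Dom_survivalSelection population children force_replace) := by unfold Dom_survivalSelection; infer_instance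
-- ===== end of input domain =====

-- B replaces A's pairwise conflict double loop by a single pass per board with three count
-- tables and sorts the boards directly by a fitness key (same return value on Pre_).

-- ===== PORT A =====
-- Indexing is ported with List.getD: every index the Python reaches is nonnegative and,
-- on Pre_survivalSelection, in range (outside Pre_ the Python raises IndexError).
def fitnessFunction (population : List (List Int)) : List Int :=
  let g_number := (population.headI).length
  (List.range population.length).foldl
    (fun fitness i =>
      let f : Int :=
        (List.range 7).foldl
          (fun f j =>
            (List.range' (j+1) (g_number - (j+1))).foldl
              (fun f k =>
                if (population.getD i []).getD j 0 = (population.getD i []).getD k 0 then f - 1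
                else if |(population.getD i []).getD j 0 - (population.getD i []).getD k 0| = |(j:Int) - (k:Int)| then f - 1
                else f)
              f)
          28
      fitness ++ [f])
    []

def survivalSelection (population : List (List Int)) (children : List (List Int)) (force_replace : Bool) : List (List Int) :=
  let population_fitness := fitnessFunction population
  let children_fitness := fitnessFunction children
  let population_data := population_fitness.zip population
  let children_data := children_fitness.zip children
  let population_data := PySem.List.sorted population_data (fun x => x.1)
  let children_data := PySem.List.sorted children_data (fun x => x.1)
  -- slice assignment 'population_data[0:len(children_data)] = children_data' (start 0, stop = len of
  -- the assigned list): exact as prefix replacement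
  let population_data := if force_replace then children_data ++ population_data.drop children_data.length else population_data
  population_data.map (fun p => p.2)

-- ===== PORT B =====
def pvFitnessB (board : List Int) (g_number : Nat) : Int :=
  let st :=
    (List.range g_number).foldl
      (fun (st : PySem.Dict Int Int × PySem.Dict Int Int × PySem.Dict Int Int × Int) k =>
        let rows := st.1
        let diag1 := st.2.1
        let diag2 := st.2.2.1
        let conflicts := st.2.2.2
        let v := board.getD k 0
        let conflicts := conflicts + rows.getD v 0 + diag1.getD (v - (k:Int)) 0 + diag2.getD (v + (k:Int)) 0
        if k < 7 then
          (rows.insert v (rows.getD v 0 + 1),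
           diag1.insert (v - (k:Int)) (diag1.getD (v - (k:Int)) 0 + 1),
           diag2.insert (v + (k:Int)) (diag2.getD (v + (k:Int)) 0 + 1),
           conflicts)
        else (rows, diag1, diag2, conflicts))
      (PySem.Dict.empty, PySem.Dict.empty, PySem.Dict.empty, (0:Int))
  28 - st.2.2.2

def survivalSelection_alt (population : List (List Int)) (children : List (List Int)) (force_replace : Bool) : List (List Int) :=
  let g_p := (population.headI).length
  let g_c := (children.headI).length
  let pop_sorted := PySem.List.sorted population (fun b => pvFitnessB b g_p)
  let ch_sorted := PySem.List.sorted children (fun b => pvFitnessB b g_c)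
  if force_replace then ch_sorted ++ pop_sorted.drop children.length else pop_sorted

-- ===== PRECONDITION & SPEC =====
-- Pre_ excludes the inputs on which the Python A raises IndexError (empty population/children, or a
-- row shorter than its list's first row) and additionally the ragged inputs whose first row has
-- length ≤ 1, on which A never indexes the rows and returns while B's per-position pass raises.
def Pre_survivalSelection (population : List (List Int)) (children : List (List Int)) (force_replace : Bool) : Prop :=
  population ≠ [] ∧ children ≠ [] ∧
  (∀ row ∈ population, (population.headI).length ≤ row.length) ∧
  (∀ row ∈ children, (children.headI).length ≤ row.length)
instance (population : List (List Int)) (children : List (List Int)) (force_replace : Bool) : Decidable (Pre_survivalSelection population children force_replace) := by unfold Pre_survivalSelection; infer_instance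

def pvWitness_survivalSelection : List (List Int) × List (List Int) × Bool :=
  ([[0, 1], [1, 1]], [[2, 0]], true)

def Spec_survivalSelection (population : List (List Int)) (children : List (List Int)) (force_replace : Bool) (out : List (List Int)) : Prop := out = survivalSelection_alt population children force_replace
instance (population : List (List Int)) (children : List (List Int)) (force_replace : Bool) (out : List (List Int)) : Decidable (Spec_survivalSelection population children force_replace out) := by unfold Spec_survivalSelection; infer_instance

-- ===== CLAIM (what is proved, stated in full; the proofs are below) =====
def Claim_equal_survivalSelection : Prop := ∀ (population : List (List Int)) (children : List (List Int)) (force_replace : Bool), Dom_survivalSelection population children force_replace → Pre_survivalSelection population children force_replace → Spec_survivalSelection population children force_replace (survivalSelection population children force_replace)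

-- ===== LEMMAS AND PROOFS =====

-- conflict indicators for the pair (j,k), j < k
def indA (r : List Int) (j k : Nat) : Int :=
  if r.getD j 0 = r.getD k 0 then 1
  else if |r.getD j 0 - r.getD k 0| = |(j:Int) - (k:Int)| then 1
  else 0

def keyV (r : List Int) (j : Nat) : Int := r.getD j 0
def key1 (r : List Int) (j : Nat) : Int := r.getD j 0 - j
def key2 (r : List Int) (j : Nat) : Int := r.getD j 0 + j

def indB (r : List Int) (j k : Nat) : Int :=
  (if keyV r j = keyV r k then 1 else 0)
  + (if key1 r j = key1 r k then 1 else 0)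
  + (if key2 r j = key2 r k then 1 else 0)

lemma ind_eq (r : List Int) (j k : Nat) (h : j < k) : indA r j k = indB r j k := by
  unfold indA indB keyV key1 key2
  have hjk : (j:Int) < (k:Int) := by exact_mod_cast h
  have habs1 : |(j:Int) - (k:Int)| = (k:Int) - j := by
    rw [abs_sub_comm]; exact abs_of_nonneg (by omega)
  simp only [habs1, abs_eq (show (0:Int) ≤ (k:Int) - j by omega)]
  split_ifs <;> omega

lemma sum_map_neg {α : Type} (l : List α) (f : α → Int) :
    (l.map (fun x => -(f x))).sum = -((l.map f).sum) := by
  induction l with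
  | nil => simp
  | cons x l ih => simp [ih]; ring

lemma sum_map_add {α : Type} (l : List α) (f g : α → Int) :
    (l.map (fun x => f x + g x)).sum = (l.map f).sum + (l.map g).sum := by
  induction l with
  | nil => simp
  | cons x l ih => simp [ih]; ring

def rowFitA (r : List Int) (g : Nat) : Int :=
  (List.range 7).foldl
    (fun f j =>
      (List.range' (j+1) (g - (j+1))).foldl
        (fun f k =>
          if r.getD j 0 = r.getD k 0 then f - 1
          else if |r.getD j 0 - r.getD k 0| = |(j:Int) - (k:Int)| then f - 1
          else f)
        f)
    28

lemma map_range_getD {α β : Type} (l : List α) (d : α) (G : α → β) :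
    (List.range l.length).map (fun i => G (l.getD i d)) = l.map G := by
  apply List.ext_getElem
  · simp
  · intro i h1 h2
    simp only [List.getElem_map, List.getElem_range]
    congr 1
    exact List.getD_eq_getElem l d (by simpa using h2)

lemma fitnessFunction_eq_map (population : List (List Int)) :
    fitnessFunction population
      = population.map (fun r => rowFitA r (population.headI).length) := by
  unfold fitnessFunction rowFitA
  simp only [PySem.List.foldl_append_singleton_eq_map, List.nil_append]
  exact map_range_getD population [] (fun r => rowFitA r (population.headI).length)

lemma rowFitA_eq (r : List Int) (g : Nat) :
    rowFitA r g
      = 28 - ((List.range 7).map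
          (fun j => ((List.range' (j+1) (g - (j+1))).map (fun k => indA r j k)).sum)).sum := by
  unfold rowFitA
  rw [PySem.List.foldl_congr_mem _ _
      (fun f j => f + -(((List.range' (j+1) (g - (j+1))).map (fun k => indA r j k)).sum)) 28
      ?_]
  · rw [PySem.List.foldl_add, sum_map_neg]; ring
  · intro acc j _
    rw [PySem.List.foldl_congr_mem _ _ (fun f k => f + -(indA r j k)) acc ?_]
    · rw [PySem.List.foldl_add, sum_map_neg]
    · intro acc' k _
      unfold indA
      by_cases h1 : r.getD j 0 = r.getD k 0
      · simp only [h1, if_true]; ring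
      · by_cases h2 : |r.getD j 0 - r.getD k 0| = |(j:Int) - (k:Int)|
        · simp only [h1, h2, if_true, if_false]; ring
        · simp only [h1, h2, if_false]; ring

-- B's per-position conflict count: matches among earlier indices < 7
def cntB (r : List Int) (k : Nat) : Int :=
  ((((List.range (min k 7)).map (keyV r)).count (keyV r k) : Nat) : Int)
  + ((((List.range (min k 7)).map (key1 r)).count (key1 r k) : Nat) : Int)
  + ((((List.range (min k 7)).map (key2 r)).count (key2 r k) : Nat) : Int)

def dictOf (l : List Int) : PySem.Dict Int Int :=
  l.foldl (fun d x => d.insert x (d.getD x 0 + 1)) PySem.Dict.empty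

lemma dictOf_getD (l : List Int) (v : Int) : (dictOf l).getD v 0 = (l.count v : Int) := by
  unfold dictOf
  rw [PySem.Dict.getD_foldl_insert_add_one]
  simp [PySem.Dict.empty, PySem.Dict.getD, PySem.Dict.get?]

lemma dictOf_append (l : List Int) (x : Int) :
    dictOf (l ++ [x]) = (dictOf l).insert x ((dictOf l).getD x 0 + 1) := by
  unfold dictOf
  rw [List.foldl_append]
  simp

lemma pvFitnessB_state (board : List Int) (n : Nat) :
    (List.range n).foldl
      (fun (st : PySem.Dict Int Int × PySem.Dict Int Int × PySem.Dict Int Int × Int) k =>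
        let rows := st.1
        let diag1 := st.2.1
        let diag2 := st.2.2.1
        let conflicts := st.2.2.2
        let v := board.getD k 0
        let conflicts := conflicts + rows.getD v 0 + diag1.getD (v - (k:Int)) 0 + diag2.getD (v + (k:Int)) 0
        if k < 7 then
          (rows.insert v (rows.getD v 0 + 1),
           diag1.insert (v - (k:Int)) (diag1.getD (v - (k:Int)) 0 + 1),
           diag2.insert (v + (k:Int)) (diag2.getD (v + (k:Int)) 0 + 1),
           conflicts)
        else (rows, diag1, diag2, conflicts))
      (PySem.Dict.empty, PySem.Dict.empty, PySem.Dict.empty, (0:Int))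
    = (dictOf ((List.range (min n 7)).map (keyV board)),
       dictOf ((List.range (min n 7)).map (key1 board)),
       dictOf ((List.range (min n 7)).map (key2 board)),
       ((List.range n).map (cntB board)).sum) := by
  induction n with
  | zero => simp [dictOf]
  | succ n ih =>
    rw [List.range_succ, List.foldl_append, ih]
    simp only [List.foldl_cons, List.foldl_nil]
    by_cases h7 : n < 7
    · have hmin : min (n+1) 7 = (min n 7) + 1 := by omega
      have hmn : min n 7 = n := by omega
      simp only [h7, if_true, hmin, List.range_succ, List.map_append, List.map_cons, List.map_nil,
        dictOf_append, hmn]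
      refine Prod.ext rfl (Prod.ext rfl (Prod.ext rfl ?_))
      rw [List.sum_append]
      simp only [dictOf_getD, List.sum_cons, List.sum_nil, add_zero, cntB, keyV, key1, key2, hmn]
      ring
    · have hmin : min (n+1) 7 = min n 7 := by omega
      simp only [h7, if_false, hmin, List.map_append, List.sum_append]
      refine Prod.ext rfl (Prod.ext rfl (Prod.ext rfl ?_))
      simp only [dictOf_getD, List.map_cons, List.map_nil, List.sum_cons, List.sum_nil, add_zero,
        cntB, keyV, key1, key2]
      ring

lemma pvFitnessB_eq (board : List Int) (g : Nat) :
    pvFitnessB board g = 28 - ((List.range g).map (cntB board)).sum := by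
  unfold pvFitnessB
  rw [pvFitnessB_state]

lemma count_map_eq_sum (f : Nat → Int) (l : List Nat) (v : Int) :
    (((l.map f).count v : Nat) : Int) = (l.map (fun j => if f j = v then (1:Int) else 0)).sum := by
  induction l with
  | nil => simp
  | cons x l ih =>
    simp only [List.map_cons, List.count_cons, List.sum_cons]
    rw [← ih]
    by_cases h : f x = v
    · simp [h]; ring
    · simp [h]

lemma cntB_eq (r : List Int) (k : Nat) :
    cntB r k = ((List.range (min k 7)).map (fun j => indB r j k)).sum := by
  unfold cntB indB
  rw [count_map_eq_sum, count_map_eq_sum, count_map_eq_sum, ← sum_map_add, ← sum_map_add]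

lemma ite_range_sum (G : Nat → Int) (g m : Nat) :
    ((List.range m).map (fun j => if j < g then G j else 0)).sum
      = ((List.range (min g m)).map G).sum := by
  induction m with
  | zero => simp
  | succ m ih =>
    rw [List.range_succ, List.map_append, List.sum_append, ih]
    by_cases h : m < g
    · have hmin : min g (m+1) = (min g m) + 1 := by omega
      have hm : min g m = m := by omega
      rw [hmin, List.range_succ, List.map_append, List.sum_append, hm]
      simp [h]
    · have hmin : min g (m+1) = min g m := by omega
      rw [hmin]
      simp [h]

lemma exchange (r : List Int) (g : Nat) :
    ((List.range 7).map
        (fun j => ((List.range' (j+1) (g - (j+1))).map (fun k => indA r j k)).sum)).sum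
      = ((List.range g).map (cntB r)).sum := by
  induction g with
  | zero => simp
  | succ g ih =>
    have hstep : ∀ j ∈ List.range 7,
        ((List.range' (j+1) ((g+1) - (j+1))).map (fun k => indA r j k)).sum
          = ((List.range' (j+1) (g - (j+1))).map (fun k => indA r j k)).sum
            + (if j < g then indA r j g else 0) := by
      intro j _
      by_cases hj : j < g
      · have hlen : (g+1) - (j+1) = (g - (j+1)) + 1 := by omega
        have hlast : (j+1) + 1 * (g - (j+1)) = g := by omega
        rw [hlen, List.range'_concat, hlast, List.map_append, List.sum_append]
        simp [hj]
      · have hl1 : (g+1) - (j+1) = 0 := by omega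
        have hl2 : g - (j+1) = 0 := by omega
        simp [hl1, hl2, hj]
    rw [List.map_congr_left hstep, sum_map_add, ih, ite_range_sum]
    rw [List.range_succ, List.map_append, List.sum_append]
    simp only [List.map_cons, List.map_nil, List.sum_cons, List.sum_nil, add_zero]
    congr 1
    rw [cntB_eq]
    refine congrArg List.sum (List.map_congr_left ?_)
    intro j hj
    have hj' : j < min g 7 := by simpa using hj
    exact ind_eq r j g (by omega)

lemma insertBy_map {α β : Type} (key : β → Int) (h : α → β) (x : α) (ys : List α) :
    PySem.List.insertBy (fun a b => decide (key a < key b)) (h x) (ys.map h)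
      = (PySem.List.insertBy (fun a b => decide (key (h a) < key (h b))) x ys).map h := by
  induction ys with
  | nil => simp [PySem.List.insertBy]
  | cons y ys ih =>
    simp only [List.map_cons, PySem.List.insertBy]
    by_cases hc : key (h x) < key (h y)
    · simp [hc]
    · simp [hc, ih]

lemma sorted_map_key {α β : Type} (l : List α) (h : α → β) (key : β → Int) :
    PySem.List.sorted (l.map h) key = (PySem.List.sorted l (fun x => key (h x))).map h := by
  rw [PySem.List.sorted_eq_foldl_insertBy, PySem.List.sorted_eq_foldl_insertBy, List.foldl_map]
  have H : ∀ (l' acc : List α),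
      List.foldl (fun acc x => PySem.List.insertBy (fun a b => decide (key a < key b)) (h x) acc)
        (acc.map h) l'
      = (List.foldl (fun acc x =>
          PySem.List.insertBy (fun a b => decide (key (h a) < key (h b))) x acc) acc l').map h := by
    intro l'
    induction l' with
    | nil => intro acc; simp
    | cons x xs ih =>
      intro acc
      simp only [List.foldl_cons]
      rw [insertBy_map, ih]
  simpa using H l []

lemma zip_map_pair {α : Type} (f : α → Int) (l : List α) :
    (l.map f).zip l = l.map (fun x => (f x, x)) := by
  induction l with
  | nil => simp
  | cons x l ih => simp [ih]

lemma sorted_zip {α : Type} (f : α → Int) (l : List α) :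
    PySem.List.sorted ((l.map f).zip l) (fun x => x.1)
      = (PySem.List.sorted l f).map (fun x => (f x, x)) := by
  rw [zip_map_pair, sorted_map_key l (fun x => (f x, x)) (fun x => x.1)]

lemma fitness_lists_eq (population : List (List Int)) :
    fitnessFunction population
      = population.map (fun r => pvFitnessB r (population.headI).length) := by
  rw [fitnessFunction_eq_map]
  refine List.map_congr_left ?_
  intro r _
  rw [rowFitA_eq, pvFitnessB_eq, exchange]

-- ===== VERDICT (by name: the statement is the Claim_ definition above) =====
theorem survivalSelection_spec : Claim_equal_survivalSelection := by
  intro population children force_replace _ _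
  unfold Spec_survivalSelection survivalSelection survivalSelection_alt
  simp only [fitness_lists_eq, sorted_zip]
  cases force_replace <;>
    simp [List.map_append, List.map_drop, List.map_map, Function.comp_def,
      PySem.List.length_sorted]
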